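-- pv_equiv track=rewrite | github.com/federicodip/AIgino | scripts/extract_pdf.py | get_author_for_page
-- ===== SOURCE A (Python) =====
-- AUTHOR_SECTIONS = [
--     # (start_en, end_en, author_id, author_display)
--     (66,  78,  "frontinus",        "Julius Frontinus"),
--     (80,  138, "agennius_urbicus", "Agennius Urbicus"),
--     (114, 138, "commentum",        "Commentum"),  # overlaps Agennius — see note below
--     (140, 164, "hyginus1",         "Hyginus 1"),
--     (166, 196, "siculus_flaccus",  "Siculus Flaccus"),
--     (198, 226, "hyginus2",         "Hyginus 2"),
--     (228, 266, "liber_coloniarum", "Liber Coloniarum"),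
--     (268, 280, "balbus",           "Balbus"),
--     (282, 282, "lex_mamilia",      "Lex Mamilia"),
--     (284, 284, "tombs",            "Tombs"),
--     (286, 288, "dolabella",        "Dolabella"),
--     (290, 292, "latinus",          "Latinus"),
--     (294, 302, "casae_litterarum", "Casae Litterarum"),
--     (304, 306, "names_surveyors",  "Names of Land Surveyors"),
--     (308, 336, "various_authors",  "Various Authors: Boundaries and Lands"),
-- ]
--
-- def get_author_for_page(pdf_page: int) -> tuple[str, str]:
--     """Return (author_id, author_display) for a given PDF page index."""
--     # Check from most specific (latest start) to least specific
--     best = None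
--     for start, end, aid, display in AUTHOR_SECTIONS:
--         if start <= pdf_page <= end:
--             if best is None or start > best[0]:
--                 best = (start, end, aid, display)
--     if best:
--         return best[2], best[3]
--     return "unknown", "Unknown"
-- ===== SOURCE B (Python) =====
-- # The overlapping interval list is flattened once into a step-function table:
-- # PAGE_STEPS[i] = (threshold, (author_id, author_display)) means every page p with
-- # threshold <= p < next threshold maps to that author.  Overlaps are already
-- # resolved (the larger-start, more specific section wins), so a query is just
-- # "find the last threshold <= p": scan the table from the end.
-- PAGE_STEPS = [
--     (66,  ("frontinus",        "Julius Frontinus")),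
--     (79,  ("unknown",          "Unknown")),
--     (80,  ("agennius_urbicus", "Agennius Urbicus")),
--     (114, ("commentum",        "Commentum")),
--     (139, ("unknown",          "Unknown")),
--     (140, ("hyginus1",         "Hyginus 1")),
--     (165, ("unknown",          "Unknown")),
--     (166, ("siculus_flaccus",  "Siculus Flaccus")),
--     (197, ("unknown",          "Unknown")),
--     (198, ("hyginus2",         "Hyginus 2")),
--     (227, ("unknown",          "Unknown")),
--     (228, ("liber_coloniarum", "Liber Coloniarum")),
--     (267, ("unknown",          "Unknown")),
--     (268, ("balbus",           "Balbus")),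
--     (281, ("unknown",          "Unknown")),
--     (282, ("lex_mamilia",      "Lex Mamilia")),
--     (283, ("unknown",          "Unknown")),
--     (284, ("tombs",            "Tombs")),
--     (285, ("unknown",          "Unknown")),
--     (286, ("dolabella",        "Dolabella")),
--     (289, ("unknown",          "Unknown")),
--     (290, ("latinus",          "Latinus")),
--     (293, ("unknown",          "Unknown")),
--     (294, ("casae_litterarum", "Casae Litterarum")),
--     (303, ("unknown",          "Unknown")),
--     (304, ("names_surveyors",  "Names of Land Surveyors")),
--     (307, ("unknown",          "Unknown")),
--     (308, ("various_authors",  "Various Authors: Boundaries and Lands")),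
--     (337, ("unknown",          "Unknown")),
-- ]
--
--
-- def get_author_for_page(pdf_page: int) -> tuple[str, str]:
--     """Return (author_id, author_display) for a given PDF page index."""
--     for threshold, result in reversed(PAGE_STEPS):
--         if threshold <= pdf_page:
--             return result
--     return "unknown", "Unknown"
-- ===== Notes on version B (the rewrite author's own statement) =====
-- stated objective: faster
-- what changed: Replaces the per-call max-start scan over the overlapping interval list with a pre-flattened step-function table (one threshold per boundary, overlaps already resolved) queried by a single reverse scan for the last threshold <= page, which stops at the first hit.
import Mathlib
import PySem

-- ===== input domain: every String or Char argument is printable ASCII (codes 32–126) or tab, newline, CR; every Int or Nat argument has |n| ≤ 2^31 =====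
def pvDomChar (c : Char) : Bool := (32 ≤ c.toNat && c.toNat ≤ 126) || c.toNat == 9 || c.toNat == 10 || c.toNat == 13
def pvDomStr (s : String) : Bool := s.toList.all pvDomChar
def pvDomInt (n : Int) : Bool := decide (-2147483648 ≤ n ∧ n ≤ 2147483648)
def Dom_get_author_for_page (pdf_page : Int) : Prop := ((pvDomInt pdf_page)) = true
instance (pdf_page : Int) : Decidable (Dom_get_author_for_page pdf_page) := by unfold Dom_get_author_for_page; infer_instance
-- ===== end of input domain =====

-- B flattens the overlapping interval list once into a step-function table (overlaps
-- pre-resolved) and answers each query by an early-exit reverse scan for the last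
-- threshold <= page, instead of A's max-start scan over all sections.


-- ===== PORT A =====
def AUTHOR_SECTIONS : List (Int × Int × String × String) := [
  (66, 78, "frontinus", "Julius Frontinus"),
  (80, 138, "agennius_urbicus", "Agennius Urbicus"),
  (114, 138, "commentum", "Commentum"),
  (140, 164, "hyginus1", "Hyginus 1"),
  (166, 196, "siculus_flaccus", "Siculus Flaccus"),
  (198, 226, "hyginus2", "Hyginus 2"),
  (228, 266, "liber_coloniarum", "Liber Coloniarum"),
  (268, 280, "balbus", "Balbus"),
  (282, 282, "lex_mamilia", "Lex Mamilia"),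
  (284, 284, "tombs", "Tombs"),
  (286, 288, "dolabella", "Dolabella"),
  (290, 292, "latinus", "Latinus"),
  (294, 302, "casae_litterarum", "Casae Litterarum"),
  (304, 306, "names_surveyors", "Names of Land Surveyors"),
  (308, 336, "various_authors", "Various Authors: Boundaries and Lands")]

def get_author_for_page (pdf_page : Int) : String × String :=
  let best := AUTHOR_SECTIONS.foldl
    (fun (best : Option (Int × Int × String × String)) s =>
      if s.1 ≤ pdf_page ∧ pdf_page ≤ s.2.1 then
        match best with
        | none => some s
        | some b => if s.1 > b.1 then some s else best
      else best) none
  match best with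
  | some b => (b.2.2.1, b.2.2.2)
  | none => ("unknown", "Unknown")

-- ===== PORT B =====
def PAGE_STEPS : List (Int × String × String) := [
  (66, "frontinus", "Julius Frontinus"),
  (79, "unknown", "Unknown"),
  (80, "agennius_urbicus", "Agennius Urbicus"),
  (114, "commentum", "Commentum"),
  (139, "unknown", "Unknown"),
  (140, "hyginus1", "Hyginus 1"),
  (165, "unknown", "Unknown"),
  (166, "siculus_flaccus", "Siculus Flaccus"),
  (197, "unknown", "Unknown"),
  (198, "hyginus2", "Hyginus 2"),
  (227, "unknown", "Unknown"),
  (228, "liber_coloniarum", "Liber Coloniarum"),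
  (267, "unknown", "Unknown"),
  (268, "balbus", "Balbus"),
  (281, "unknown", "Unknown"),
  (282, "lex_mamilia", "Lex Mamilia"),
  (283, "unknown", "Unknown"),
  (284, "tombs", "Tombs"),
  (285, "unknown", "Unknown"),
  (286, "dolabella", "Dolabella"),
  (289, "unknown", "Unknown"),
  (290, "latinus", "Latinus"),
  (293, "unknown", "Unknown"),
  (294, "casae_litterarum", "Casae Litterarum"),
  (303, "unknown", "Unknown"),
  (304, "names_surveyors", "Names of Land Surveyors"),
  (307, "unknown", "Unknown"),
  (308, "various_authors", "Various Authors: Boundaries and Lands"),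
  (337, "unknown", "Unknown")]

-- 'for threshold, result in reversed(PAGE_STEPS): if threshold <= pdf_page: return result'
def get_author_for_page_alt (pdf_page : Int) : String × String :=
  match PAGE_STEPS.reverse.find? (fun step => decide (step.1 ≤ pdf_page)) with
  | some step => step.2
  | none => ("unknown", "Unknown")

-- ===== PRECONDITION & SPEC =====
def Spec_get_author_for_page (pdf_page : Int) (out : String × String) : Prop := out = get_author_for_page_alt pdf_page
instance (pdf_page : Int) (out : String × String) : Decidable (Spec_get_author_for_page pdf_page out) := by unfold Spec_get_author_for_page; infer_instance

-- ===== CLAIM (what is proved, stated in full; the proofs are below) =====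
def Claim_equal_get_author_for_page : Prop := ∀ (pdf_page : Int), Dom_get_author_for_page pdf_page → Spec_get_author_for_page pdf_page (get_author_for_page pdf_page)

-- ===== LEMMAS AND PROOFS =====

-- the two ports agree on every page in [66, 337]
set_option maxRecDepth 100000 in
set_option maxHeartbeats 2000000 in
theorem inrange : ∀ p ∈ PySem.List.pyRange 66 338 1, get_author_for_page p = get_author_for_page_alt p := by decide

-- A's accumulator stays none when no section matches p
theorem foldl_none (p : Int) (l : List (Int × Int × String × String))
    (best : Option (Int × Int × String × String))
    (h : ∀ s ∈ l, ¬(s.1 ≤ p ∧ p ≤ s.2.1)) :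
    l.foldl (fun (best : Option (Int × Int × String × String)) s =>
      if s.1 ≤ p ∧ p ≤ s.2.1 then
        match best with
        | none => some s
        | some b => if s.1 > b.1 then some s else best
      else best) best = best := by
  induction l generalizing best with
  | nil => rfl
  | cons a t ih =>
    simp only [List.foldl_cons]
    rw [if_neg (h a (by simp))]
    exact ih best (fun s hs => h s (by simp [hs]))

theorem sections_low : ∀ s ∈ AUTHOR_SECTIONS, 66 ≤ s.1 := by decide

theorem belowA (p : Int) (h : p < 66) : get_author_for_page p = ("unknown", "Unknown") := by
  unfold get_author_for_page
  rw [foldl_none p AUTHOR_SECTIONS none (fun s hs => by have := sections_low s hs; omega)]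

-- B's reverse scan finds no threshold when p < 66
theorem steps_low : ∀ s ∈ PAGE_STEPS.reverse, 66 ≤ s.1 := by decide

theorem belowB (p : Int) (h : p < 66) : get_author_for_page_alt p = ("unknown", "Unknown") := by
  unfold get_author_for_page_alt
  rw [List.find?_eq_none.mpr (fun s hs => by simpa using not_le_of_gt (lt_of_lt_of_le h (steps_low s hs)))]

-- above 337 both are "unknown": A by foldl_none, B because the last step (337, unknown) fires
theorem sections_high : ∀ s ∈ AUTHOR_SECTIONS, s.2.1 ≤ 336 := by decide

theorem aboveA (p : Int) (h : 337 < p) : get_author_for_page p = ("unknown", "Unknown") := by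
  unfold get_author_for_page
  rw [foldl_none p AUTHOR_SECTIONS none (fun s hs => by have := sections_high s hs; omega)]

theorem aboveB (p : Int) (h : 337 < p) : get_author_for_page_alt p = ("unknown", "Unknown") := by
  unfold get_author_for_page_alt
  have : PAGE_STEPS.reverse.find? (fun step => decide (step.1 ≤ p))
      = some (337, "unknown", "Unknown") := by
    show List.find? _ ((337, "unknown", "Unknown") :: _) = _
    rw [List.find?_cons_of_pos]
    simpa using le_of_lt h
  rw [this]

-- ===== VERDICT (by name: the statement is the Claim_ definition above) =====
theorem get_author_for_page_spec : Claim_equal_get_author_for_page := by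
  intro p _
  unfold Spec_get_author_for_page
  by_cases h : 66 ≤ p ∧ p ≤ 337
  · exact inrange p (PySem.List.mem_pyRange_one.mpr ⟨h.1, by omega⟩)
  · rcases (not_and_or.mp h) with h' | h'
    · rw [belowA p (by omega), belowB p (by omega)]
    · rw [aboveA p (by omega), aboveB p (by omega)]
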